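-- pv_equiv track=rewrite | github.com/ElizabethKaren/interview_practice_questions | max_product_of_two.py | max_product_of_two
-- ===== SOURCE A (Python) =====
-- nums = [3,4,5,2]
--
-- def max_product_of_two(nums):
--     largest_num = 0
--     for i in range(len(nums)):
--         for j in range(len(nums)):
--             new_sum = (nums[i]-1)*(nums[j]-1)
--             if new_sum > largest_num and i != j:
--                 largest_num = new_sum
--     return largest_num
-- ===== SOURCE B (Python) =====
-- def max_product_of_two(nums):
--     best = 0
--     bounds = None
--     for x in nums:
--         v = x - 1
--         if bounds is None:
--             bounds = (v, v)
--         else: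
--             lo, hi = bounds
--             best = max(best, v * lo, v * hi)
--             bounds = (min(lo, v), max(hi, v))
--     return best
-- ===== Notes on version B (the rewrite author's own statement) =====
-- stated objective: faster
-- what changed: Replaced the O(n^2) double loop over all index pairs by a single pass that keeps the best product so far together with the running min and max of the shifted values, pairing each new element only with those two extremes.
import Mathlib
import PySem

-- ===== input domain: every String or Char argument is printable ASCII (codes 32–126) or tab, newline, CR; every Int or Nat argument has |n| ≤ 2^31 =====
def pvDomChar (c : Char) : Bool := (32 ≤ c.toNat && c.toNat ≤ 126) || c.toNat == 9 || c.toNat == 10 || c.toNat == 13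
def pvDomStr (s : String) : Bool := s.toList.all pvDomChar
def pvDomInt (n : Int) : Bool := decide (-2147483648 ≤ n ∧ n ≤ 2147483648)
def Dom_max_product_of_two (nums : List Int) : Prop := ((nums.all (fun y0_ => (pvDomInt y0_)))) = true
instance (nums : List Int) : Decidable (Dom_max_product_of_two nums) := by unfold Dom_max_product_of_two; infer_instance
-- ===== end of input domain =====

-- B replaces A's double loop over all index pairs by one pass tracking the best product and the
-- running min/max of the shifted values (faster: O(n) instead of O(n^2)).

-- ===== PORT A =====
def max_product_of_two (nums : List Int) : Int :=
  (PySem.List.pyRange 0 (nums.length : Int) 1).foldl (fun largest i =>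
    (PySem.List.pyRange 0 (nums.length : Int) 1).foldl (fun acc j =>
      let s := (PySem.List.pyGetD nums i 0 - 1) * (PySem.List.pyGetD nums j 0 - 1)
      if s > acc ∧ i ≠ j then s else acc) largest) 0

-- ===== PORT B =====
def bStep (st : Int × Option (Int × Int)) (x : Int) : Int × Option (Int × Int) :=
  let v := x - 1
  match st with
  | (best, none) => (best, some (v, v))
  | (best, some (lo, hi)) => (max (max best (v * lo)) (v * hi), some (min lo v, max hi v))

def max_product_of_two_alt (nums : List Int) : Int :=
  (nums.foldl bStep (0, none)).1

-- ===== PRECONDITION & SPEC =====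
def Spec_max_product_of_two (nums : List Int) (out : Int) : Prop := out = max_product_of_two_alt nums
instance (nums : List Int) (out : Int) : Decidable (Spec_max_product_of_two nums out) := by unfold Spec_max_product_of_two; infer_instance

-- ===== CLAIM (what is proved, stated in full; the proofs are below) =====
def Claim_equal_max_product_of_two : Prop := ∀ (nums : List Int), Dom_max_product_of_two nums → Spec_max_product_of_two nums (max_product_of_two nums)

-- ===== LEMMAS AND PROOFS =====

-- the products of all (unordered, distinct-position) pairs of l
def prods : List Int → List Int
  | [] => []
  | x :: xs => xs.map (fun y => x * y) ++ prods xs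

-- common specification: max of 0 and all pairwise products
def pairSup (l : List Int) : Int := (prods l).foldl max 0

def Lmin : List Int → Int
  | [] => 0
  | x :: xs => xs.foldl min x

def Lmax : List Int → Int
  | [] => 0
  | x :: xs => xs.foldl max x

-- generic fold lemmas
theorem le_foldl_of {α : Type} (f : Int → α → Int) (l : List α) (a : Int)
    (hge : ∀ acc x, acc ≤ f acc x) : a ≤ l.foldl f a := by
  induction l generalizing a with
  | nil => simp
  | cons y t ih => exact le_trans (hge a y) (ih _)

theorem foldl_le_of {α : Type} (f : Int → α → Int) (l : List α) (a b : Int)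
    (h0 : a ≤ b) (hstep : ∀ acc, acc ≤ b → ∀ x ∈ l, f acc x ≤ b) : l.foldl f a ≤ b := by
  induction l generalizing a with
  | nil => simpa
  | cons y t ih =>
      exact ih (f a y) (hstep a h0 y (List.mem_cons_self)) (fun acc hacc x hx => hstep acc hacc x (List.mem_cons_of_mem _ hx))

theorem foldl_reach {α : Type} (f : Int → α → Int) (l : List α) (a : Int) (x : α)
    (hx : x ∈ l) (hge : ∀ acc y, acc ≤ f acc y)
    (hmono : ∀ a b y, a ≤ b → f a y ≤ f b y) : f a x ≤ l.foldl f a := by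
  induction l generalizing a with
  | nil => cases hx
  | cons y t ih =>
      rcases List.mem_cons.mp hx with rfl | hx'
      · exact le_foldl_of f t (f a x) hge
      · exact le_trans (hmono a (f a y) x (hge a y)) (ih (f a y) hx')

theorem foldl_mono {α : Type} (f : Int → α → Int) (l : List α)
    (hmono : ∀ a b x, a ≤ b → f a x ≤ f b x) :
    ∀ a b : Int, a ≤ b → l.foldl f a ≤ l.foldl f b := by
  induction l with
  | nil => intro a b h; simpa
  | cons y t ih => intro a b h; exact ih _ _ (hmono a b y h)

theorem mem_le_pairSup (l : List Int) (q : Int) (hq : q ∈ prods l) : q ≤ pairSup l := by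
  have := foldl_reach max (prods l) 0 q hq (fun acc y => le_max_left _ _)
    (fun a b y hab => max_le_max hab le_rfl)
  exact le_trans (le_max_right 0 q) this

theorem pairSup_nonneg (l : List Int) : 0 ≤ pairSup l :=
  le_foldl_of max (prods l) 0 (fun acc x => le_max_left _ _)

theorem prods_mem (l : List Int) (i j : Nat) (hij : i < j) (hj : j < l.length) :
    l.getD i 0 * l.getD j 0 ∈ prods l := by
  induction l generalizing i j with
  | nil => simp at hj
  | cons x xs ih =>
      cases i with
      | zero =>
          obtain ⟨j', rfl⟩ : ∃ j', j = j' + 1 := ⟨j - 1, by omega⟩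
          have hj' : j' < xs.length := by simpa using hj
          have : xs.getD j' 0 ∈ xs := by
            rw [List.getD_eq_getElem _ _ hj']; exact List.getElem_mem hj'
          exact List.mem_append_left _ (List.mem_map.mpr ⟨_, this, rfl⟩)
      | succ i' =>
          obtain ⟨j', rfl⟩ : ∃ j', j = j' + 1 := ⟨j - 1, by omega⟩
          exact List.mem_append_right _ (ih i' j' (by omega) (by simpa using hj))

theorem mem_prods (l : List Int) (q : Int) (hq : q ∈ prods l) :
    ∃ i j : Nat, i < j ∧ j < l.length ∧ q = l.getD i 0 * l.getD j 0 := by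
  induction l with
  | nil => cases hq
  | cons x xs ih =>
      rcases List.mem_append.mp hq with h | h
      · obtain ⟨y, hy, rfl⟩ := List.mem_map.mp h
        obtain ⟨j', hj', hy'⟩ := List.mem_iff_getElem.mp hy
        refine ⟨0, j' + 1, by omega, by simpa using hj', ?_⟩
        have h2 : (x :: xs).getD (j' + 1) 0 = y := by
          rw [List.getD_cons_succ, List.getD_eq_getElem _ _ hj', hy']
        rw [h2]; rfl
      · obtain ⟨i, j, hij, hj, rfl⟩ := ih h
        exact ⟨i + 1, j + 1, by omega, by simpa using hj, by simp⟩

theorem mul_le_max_bounds (v y lo hi : Int) (h1 : lo ≤ y) (h2 : y ≤ hi) :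
    v * y ≤ max (v * lo) (v * hi) := by
  rcases le_total 0 v with hv | hv
  · exact le_trans (mul_le_mul_of_nonneg_left h2 hv) (le_max_right _ _)
  · exact le_trans (mul_le_mul_of_nonpos_left h1 hv) (le_max_left _ _)

theorem Lmin_mem (p : List Int) (hp : p ≠ []) : Lmin p ∈ p := by
  cases p with
  | nil => exact absurd rfl hp
  | cons x xs =>
      rcases (PySem.List.foldl_min_mem xs x) with h | h
      · simp [Lmin, h]
      · exact List.mem_cons_of_mem _ (by simpa [Lmin] using h)

theorem Lmax_mem (p : List Int) (hp : p ≠ []) : Lmax p ∈ p := by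
  cases p with
  | nil => exact absurd rfl hp
  | cons x xs =>
      rcases (PySem.List.foldl_max_mem xs x) with h | h
      · simp [Lmax, h]
      · exact List.mem_cons_of_mem _ (by simpa [Lmax] using h)

theorem Lmin_le (p : List Int) (y : Int) (hy : y ∈ p) : Lmin p ≤ y := by
  cases p with
  | nil => cases hy
  | cons x xs =>
      rcases List.mem_cons.mp hy with rfl | hy'
      · exact (PySem.List.foldl_min_le xs y).1
      · exact (PySem.List.foldl_min_le xs x).2 y hy'

theorem le_Lmax (p : List Int) (y : Int) (hy : y ∈ p) : y ≤ Lmax p := by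
  cases p with
  | nil => cases hy
  | cons x xs =>
      rcases List.mem_cons.mp hy with rfl | hy'
      · exact (PySem.List.le_foldl_max xs y).1
      · exact (PySem.List.le_foldl_max xs x).2 y hy'

theorem Lmin_append_singleton (p : List Int) (v : Int) (hp : p ≠ []) :
    Lmin (p ++ [v]) = min (Lmin p) v := by
  cases p with
  | nil => exact absurd rfl hp
  | cons x xs => simp [Lmin, List.foldl_append]

theorem Lmax_append_singleton (p : List Int) (v : Int) (hp : p ≠ []) :
    Lmax (p ++ [v]) = max (Lmax p) v := by
  cases p with
  | nil => exact absurd rfl hp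
  | cons x xs => simp [Lmax, List.foldl_append]

theorem getD_append_left (p q : List Int) (i : Nat) (hi : i < p.length) :
    (p ++ q).getD i 0 = p.getD i 0 := by
  rw [List.getD_eq_getElem _ _ (by simp; omega), List.getD_eq_getElem _ _ hi,
    List.getElem_append_left hi]

theorem pairSup_append_singleton (p : List Int) (v : Int) (hp : p ≠ []) :
    pairSup (p ++ [v]) = max (max (pairSup p) (v * Lmin p)) (v * Lmax p) := by
  apply le_antisymm
  · apply foldl_le_of
    · exact le_trans (pairSup_nonneg p) (le_trans (le_max_left _ _) (le_max_left _ _))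
    · intro acc hacc q hq
      apply max_le hacc
      obtain ⟨i, j, hij, hj, rfl⟩ := mem_prods _ _ hq
      rcases lt_or_ge j p.length with hjp | hjp
      · have hq' : p.getD i 0 * p.getD j 0 ∈ prods p := prods_mem p i j hij hjp
        rw [getD_append_left _ _ _ (by omega), getD_append_left _ _ _ hjp]
        exact le_trans (mem_le_pairSup p _ hq')
          (le_trans (le_max_left _ _) (le_max_left _ _))
      · have hj' : j = p.length := by simp at hj; omega
        have hiv : i < p.length := by omega
        have hgv : (p ++ [v]).getD j 0 = v := by
          rw [hj', List.getD_eq_getElem _ _ (by simp)]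
          simp
        rw [getD_append_left _ _ _ hiv, hgv, mul_comm]
        have hmem : p.getD i 0 ∈ p := by
          rw [List.getD_eq_getElem _ _ hiv]; exact List.getElem_mem hiv
        exact le_trans (mul_le_max_bounds v (p.getD i 0) (Lmin p) (Lmax p)
          (Lmin_le p _ hmem) (le_Lmax p _ hmem))
          (max_le_max (le_max_right _ _) le_rfl)
  · apply max_le
    apply max_le
    · -- pairSup p ≤ pairSup (p ++ [v])
      apply foldl_le_of
      · exact pairSup_nonneg _
      · intro acc hacc q hq
        apply max_le hacc
        obtain ⟨i, j, hij, hj, rfl⟩ := mem_prods _ _ hq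
        have h1 : (p ++ [v]).getD i 0 = p.getD i 0 := getD_append_left _ _ _ (by omega)
        have h2 : (p ++ [v]).getD j 0 = p.getD j 0 := getD_append_left _ _ _ hj
        have := prods_mem (p ++ [v]) i j hij (by simp; omega)
        rw [h1, h2] at this
        exact mem_le_pairSup _ _ this
    · -- v * Lmin p ≤ pairSup (p ++ [v])
      obtain ⟨k, hk, hkv⟩ := List.mem_iff_getElem.mp (Lmin_mem p hp)
      have : (p ++ [v]).getD k 0 * (p ++ [v]).getD p.length 0 ∈ prods (p ++ [v]) :=
        prods_mem _ k p.length hk (by simp)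
      have e1 : (p ++ [v]).getD k 0 = Lmin p := by
        rw [getD_append_left _ _ _ hk, List.getD_eq_getElem _ _ hk, hkv]
      have e2 : (p ++ [v]).getD p.length 0 = v := by
        rw [List.getD_eq_getElem _ _ (by simp)]; simp
      rw [e1, e2, mul_comm] at this
      exact mem_le_pairSup _ _ this
    · obtain ⟨k, hk, hkv⟩ := List.mem_iff_getElem.mp (Lmax_mem p hp)
      have : (p ++ [v]).getD k 0 * (p ++ [v]).getD p.length 0 ∈ prods (p ++ [v]) :=
        prods_mem _ k p.length hk (by simp)
      have e1 : (p ++ [v]).getD k 0 = Lmax p := by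
        rw [getD_append_left _ _ _ hk, List.getD_eq_getElem _ _ hk, hkv]
      have e2 : (p ++ [v]).getD p.length 0 = v := by
        rw [List.getD_eq_getElem _ _ (by simp)]; simp
      rw [e1, e2, mul_comm] at this
      exact mem_le_pairSup _ _ this

-- the B loop on already-shifted values
def bStep' (st : Int × Option (Int × Int)) (v : Int) : Int × Option (Int × Int) :=
  match st with
  | (best, none) => (best, some (v, v))
  | (best, some (lo, hi)) => (max (max best (v * lo)) (v * hi), some (min lo v, max hi v))

theorem B_loop (rest : List Int) : ∀ (p : List Int) (best lo hi : Int), p ≠ [] →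
    best = pairSup p → lo = Lmin p → hi = Lmax p →
    (rest.foldl bStep' (best, some (lo, hi))).1 = pairSup (p ++ rest) := by
  induction rest with
  | nil => intro p best lo hi hp hb _ _; simpa using hb
  | cons v t ih =>
      intro p best lo hi hp hb hl hh
      have step : bStep' (best, some (lo, hi)) v
          = (max (max best (v * lo)) (v * hi), some (min lo v, max hi v)) := rfl
      rw [List.foldl_cons, step]
      have : p ++ v :: t = (p ++ [v]) ++ t := by simp
      rw [this]
      exact ih (p ++ [v]) _ _ _ (by simp)
        (by rw [pairSup_append_singleton p v hp, hb, hl, hh])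
        (by rw [Lmin_append_singleton p v hp, hl])
        (by rw [Lmax_append_singleton p v hp, hh])

theorem B_eq_pairSup (nums : List Int) :
    max_product_of_two_alt nums = pairSup (nums.map (fun x => x - 1)) := by
  unfold max_product_of_two_alt
  have hfm : nums.foldl bStep (0, none) = (nums.map (fun x => x - 1)).foldl bStep' (0, none) := by
    rw [List.foldl_map]
    rfl
  rw [hfm]
  cases nums with
  | nil => simp [pairSup, prods]
  | cons x t =>
      simp only [List.map_cons, List.foldl_cons]
      have step : bStep' ((0 : Int), none) (x - 1) = (0, some (x - 1, x - 1)) := rfl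
      rw [step]
      have := B_loop (t.map (fun x => x - 1)) [x - 1] 0 (x - 1) (x - 1) (by simp)
        (by simp [pairSup, prods]) (by simp [Lmin]) (by simp [Lmax])
      simpa using this

-- A side
theorem A_eq_pairSup (nums : List Int) :
    max_product_of_two nums = pairSup (nums.map (fun x => x - 1)) := by
  unfold max_product_of_two
  set vl := nums.map (fun x => x - 1) with hvl
  set n := nums.length with hn
  set R := PySem.List.pyRange 0 (n : Int) 1 with hR
  set P : Int → Int → Int := fun i j =>
    (PySem.List.pyGetD nums i 0 - 1) * (PySem.List.pyGetD nums j 0 - 1) with hP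
  have hlen : vl.length = n := by simp [hvl, hn]
  have hget : ∀ k : Nat, k < n → PySem.List.pyGetD nums (k : Int) 0 - 1 = vl.getD k 0 := by
    intro k hk
    rw [PySem.List.pyGetD_natCast, List.getD_eq_getElem _ _ (hn ▸ hk),
      List.getD_eq_getElem _ _ (hlen ▸ hk)]
    simp [hvl]
  have hmemR : ∀ i : Int, i ∈ R ↔ 0 ≤ i ∧ i < (n : Int) := by
    intro i; rw [hR, PySem.List.mem_pyRange_one]
  -- the inner step
  have inner_ge : ∀ (i : Int) (acc j : Int), acc ≤ (if P i j > acc ∧ i ≠ j then P i j else acc) := by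
    intro i acc j; split_ifs with h
    · exact le_of_lt h.1
    · exact le_rfl
  have inner_mono : ∀ (i : Int) (a b j : Int), a ≤ b →
      (if P i j > a ∧ i ≠ j then P i j else a) ≤ (if P i j > b ∧ i ≠ j then P i j else b) := by
    intro i a b j hab
    split_ifs with h1 h2 <;> first
      | exact le_rfl
      | exact hab
      | (push_neg at *; omega)
  have inner_reach : ∀ (i : Int) (acc j : Int), i ≠ j →
      P i j ≤ (if P i j > acc ∧ i ≠ j then P i j else acc) := by
    intro i acc j hij; split_ifs with h
    · exact le_rfl
    · push_neg at h; omega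
  -- product bound
  have hbound : ∀ i j : Int, i ∈ R → j ∈ R → i ≠ j → P i j ≤ pairSup vl := by
    intro i j hi hj hij
    obtain ⟨hi0, hin⟩ := (hmemR i).mp hi
    obtain ⟨hj0, hjn⟩ := (hmemR j).mp hj
    obtain ⟨i', rfl⟩ : ∃ i' : Nat, i = (i' : Int) := ⟨i.toNat, (Int.toNat_of_nonneg hi0).symm⟩
    obtain ⟨j', rfl⟩ : ∃ j' : Nat, j = (j' : Int) := ⟨j.toNat, (Int.toNat_of_nonneg hj0).symm⟩
    have hi' : i' < n := by exact_mod_cast hin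
    have hj' : j' < n := by exact_mod_cast hjn
    have hPe : P (i' : Int) (j' : Int) = vl.getD i' 0 * vl.getD j' 0 := by
      rw [hP]; dsimp only; rw [hget i' hi', hget j' hj']
    rcases Nat.lt_or_ge i' j' with h | h
    · rw [hPe]; exact mem_le_pairSup _ _ (prods_mem vl i' j' h (hlen ▸ hj'))
    · have hne' : i' ≠ j' := fun e => hij (by exact_mod_cast congrArg (fun k : Nat => (k : Int)) e)
      have h' : j' < i' := by omega
      rw [hPe, mul_comm]
      exact mem_le_pairSup _ _ (prods_mem vl j' i' h' (hlen ▸ hi'))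
  apply le_antisymm
  · -- A ≤ pairSup
    apply foldl_le_of
    · exact pairSup_nonneg vl
    · intro acc hacc i hi
      apply foldl_le_of _ _ _ _ hacc
      intro acc' hacc' j hj
      dsimp only
      split_ifs with h
      · exact hbound i j hi hj h.2
      · exact hacc'
  · -- pairSup ≤ A
    apply foldl_le_of
    · exact le_foldl_of _ _ _ (fun acc i => le_foldl_of _ _ _ (fun a j => inner_ge i a j))
    · intro acc hacc q hq
      apply max_le hacc
      obtain ⟨i', j', hij, hj, rfl⟩ := mem_prods _ _ hq
      have hj' : j' < n := hlen ▸ hj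
      have hi' : i' < n := by omega
      have hiR : ((i' : Int)) ∈ R := (hmemR _).mpr ⟨by positivity, by exact_mod_cast hi'⟩
      have hjR : ((j' : Int)) ∈ R := (hmemR _).mpr ⟨by positivity, by exact_mod_cast hj'⟩
      have hne : (i' : Int) ≠ (j' : Int) := by
        intro h; exact absurd (by exact_mod_cast h : i' = j') (by omega)
      have hPe : P (i' : Int) (j' : Int) = vl.getD i' 0 * vl.getD j' 0 := by
        rw [hP]; dsimp only; rw [hget i' hi', hget j' hj']
      -- reach through outer then inner fold
      have hreach := foldl_reach (fun acc i =>
          R.foldl (fun acc j => if P i j > acc ∧ i ≠ j then P i j else acc) acc) R 0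
          (i' : Int) hiR
          (fun acc i => le_foldl_of _ _ _ (fun a j => inner_ge i a j))
          (fun a b i hab => foldl_mono _ R (fun a b j h => inner_mono i a b j h) a b hab)
      have houter : P (i' : Int) (j' : Int) ≤ R.foldl (fun acc j =>
          if P (i' : Int) j > acc ∧ (i' : Int) ≠ j then P (i' : Int) j else acc) 0 :=
        le_trans (inner_reach (i' : Int) 0 (j' : Int) hne)
          (foldl_reach _ R 0 (j' : Int) hjR (inner_ge _) (fun a b y h => inner_mono _ a b y h))
      rw [← hPe]
      exact le_trans houter hreach

-- ===== VERDICT (by name: the statement is the Claim_ definition above) =====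
theorem max_product_of_two_spec : Claim_equal_max_product_of_two := by
  intro nums _
  unfold Spec_max_product_of_two
  rw [A_eq_pairSup, B_eq_pairSup]
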